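-- pv_equiv track=rewrite | github.com/sarperavci/UAForge | scripts/fetch_chrome_versions.py | extract_versions_by_major
-- ===== SOURCE A (Python) =====
-- from typing import Dict, List, Set
--
-- def extract_versions_by_major(versions: List[str]) -> Dict[str, List[str]]:
--     """
--     Group versions by major version number.
--
--     Args:
--         versions: List of version strings (e.g., ["89.0.4389.72", "88.0.4324.190"])
--
--     Returns:
--         Dictionary mapping major version to list of full versions
--     """
--     by_major = {}
--
--     for version in versions:
--         try:
--             major = version.split('.')[0]
--             if major not in by_major:
--                 by_major[major] = []
--             by_major[major].append(version)
--         except (ValueError, IndexError):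
--             continue
--
--     return by_major
-- ===== SOURCE B (Python) =====
-- from typing import Dict, List
--
--
-- def extract_versions_by_major(versions: List[str]) -> Dict[str, List[str]]:
--     """Group versions by major: collect the distinct majors in first-appearance
--     order, then build each group by filtering the whole list for that major."""
--     majors = []
--     for v in versions:
--         m = v.split('.')[0]
--         if m not in majors:
--             majors.append(m)
--     return {m: [v for v in versions if v.split('.')[0] == m] for m in majors}
-- ===== Notes on version B (the rewrite author's own statement) =====
-- stated objective: alternative
-- what changed: Instead of A's single pass that grows a dict of lists with membership tests, lazy group creation and a dead try/except, B first collects the distinct major keys in first-appearance order and then builds each group by an independent filter comprehension over the whole input (an outer scan over distinct majors with an inner scan over the list, no dict mutation during traversal).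
import Mathlib
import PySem

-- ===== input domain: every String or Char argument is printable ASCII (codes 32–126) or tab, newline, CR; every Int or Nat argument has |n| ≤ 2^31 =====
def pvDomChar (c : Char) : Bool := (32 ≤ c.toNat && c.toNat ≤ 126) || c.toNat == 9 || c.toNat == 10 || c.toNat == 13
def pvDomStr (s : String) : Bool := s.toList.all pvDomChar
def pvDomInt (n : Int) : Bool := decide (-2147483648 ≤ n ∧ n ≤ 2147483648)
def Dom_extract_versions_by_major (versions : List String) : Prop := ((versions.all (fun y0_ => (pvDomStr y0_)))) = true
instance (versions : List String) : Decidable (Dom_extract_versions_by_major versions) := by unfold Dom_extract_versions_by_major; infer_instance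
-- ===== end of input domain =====

-- B replaces A's single grouping pass over a dict of lists by a two-stage build:
-- collect the distinct majors in first-appearance order, then build each group by
-- an independent filter scan over the whole input: alternative decomposition, same result.

-- ===== PORT A =====
def extract_versions_by_major (versions : List String) : List (String × List String) :=
  (versions.foldl (fun by_major version =>
      -- major = version.split('.')[0]; the try/except (ValueError, IndexError) becomes
      -- the `none => by_major` branch (continue); it is in fact unreachable.
      match (PySem.Str.split? version ".").bind (fun ps => PySem.List.pyGet? ps 0) with
      | none => by_major
      | some major =>
          let by_major := if by_major.contains major then by_major
                          else by_major.insert major ([] : List String)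
          by_major.modify major [] (fun l => l ++ [version]))
    (PySem.Dict.empty : PySem.Dict String (List String))).items

-- ===== PORT B =====
-- v.split('.')[0]: split? with sep "." always returns some nonempty list, so head is exact
def pvMajor (v : String) : String := ((PySem.Str.split? v ".").getD []).headD ""

def extract_versions_by_major_alt (versions : List String) : List (String × List String) :=
  -- `if m not in majors: majors.append(m)` is exactly PySem.Set.add
  let majors : List String := versions.foldl (fun acc v => PySem.Set.add acc (pvMajor v)) []
  majors.map (fun m => (m, versions.filter (fun v => pvMajor v == m)))

-- ===== PRECONDITION & SPEC =====
def Spec_extract_versions_by_major (versions : List String) (out : List (String × List String)) : Prop := out = extract_versions_by_major_alt versions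
instance (versions : List String) (out : List (String × List String)) : Decidable (Spec_extract_versions_by_major versions out) := by unfold Spec_extract_versions_by_major; infer_instance

-- ===== CLAIM (what is proved, stated in full; the proofs are below) =====
def Claim_equal_extract_versions_by_major : Prop := ∀ (versions : List String), Dom_extract_versions_by_major versions → Spec_extract_versions_by_major versions (extract_versions_by_major versions)

-- ===== LEMMAS AND PROOFS =====

theorem pv_go_ne_nil (sep : List Char) : ∀ (fuel : Nat) (l cur : List Char) (acc : List (List Char)),
    PySem.Chars.splitOn.go sep fuel l cur acc ≠ [] := by
  intro fuel
  induction fuel with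
  | zero => intro l cur acc; simp [PySem.Chars.splitOn.go]
  | succ n ih =>
    intro l cur acc
    cases l with
    | nil => simp [PySem.Chars.splitOn.go]
    | cons c rest =>
      rw [PySem.Chars.splitOn.go]
      split
      · exact ih _ _ _
      · exact ih _ _ _

theorem pv_split_dot (v : String) :
    ∃ hd tl, PySem.Str.split? v "." = some (hd :: tl) := by
  have h := pv_go_ne_nil ".".toList (v.toList.length + 1) v.toList [] []
  simp only [PySem.Str.split?, PySem.Chars.split?, PySem.Chars.splitOn]
  cases hgo : PySem.Chars.splitOn.go ".".toList (v.toList.length + 1) v.toList [] [] with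
  | nil => exact absurd hgo h
  | cons a as => exact ⟨String.ofList a, as.map String.ofList, by simp⟩

theorem pv_keyA_eq (v : String) :
    (PySem.Str.split? v ".").bind (fun ps => PySem.List.pyGet? ps 0) = some (pvMajor v) := by
  obtain ⟨hd, tl, hs⟩ := pv_split_dot v
  simp [hs, pvMajor, PySem.List.pyGet?, PySem.List.pyIdx?]

theorem pv_step_eq (d : PySem.Dict String (List String)) (v : String) :
    (match (PySem.Str.split? v ".").bind (fun ps => PySem.List.pyGet? ps 0) with
      | none => d
      | some major =>
          let d' := if d.contains major then d else d.insert major ([] : List String)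
          d'.modify major [] (fun l => l ++ [v]))
    = d.modify (pvMajor v) [] (fun l => l ++ [v]) := by
  rw [pv_keyA_eq v]
  by_cases h : d.contains (pvMajor v)
  · simp [h]
  · have hc : d.contains (pvMajor v) = false := by simpa using h
    simp only [hc, Bool.false_eq_true, if_false, PySem.Dict.modify]
    rw [PySem.Dict.getD_insert_self, PySem.Dict.insert_insert_self,
        PySem.Dict.getD_of_not_contains d [] hc]

theorem pv_foldl_eq (versions : List String) :
    (versions.foldl (fun by_major version =>
      match (PySem.Str.split? version ".").bind (fun ps => PySem.List.pyGet? ps 0) with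
      | none => by_major
      | some major =>
          let by_major := if by_major.contains major then by_major
                          else by_major.insert major ([] : List String)
          by_major.modify major [] (fun l => l ++ [version]))
      (PySem.Dict.empty : PySem.Dict String (List String)))
    = versions.foldl (fun d v => d.modify (pvMajor v) [] (fun l => l ++ [v]))
      (PySem.Dict.empty : PySem.Dict String (List String)) := by
  congr 1
  funext d v
  exact pv_step_eq d v

-- A's dict, written out: items = first-appearance majors paired with their filters
theorem pv_dict_canonical (versions : List String) :
    (versions.foldl (fun d v => d.modify (pvMajor v) [] (fun l => l ++ [v]))
      (PySem.Dict.empty : PySem.Dict String (List String))).items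
    = (PySem.List.dedup (versions.map pvMajor)).map
        (fun m => (m, versions.filter (fun v => pvMajor v == m))) := by
  set R := versions.foldl (fun d v => d.modify (pvMajor v) [] (fun l => l ++ [v]))
      (PySem.Dict.empty : PySem.Dict String (List String)) with hR
  have hkeys : R.keys = PySem.List.dedup (versions.map pvMajor) := by
    rw [hR, PySem.Dict.keys_foldl_modify_key versions pvMajor [] (fun _ v => (fun l => l ++ [v]))]
    simp only [PySem.Dict.keys_empty]
    rw [PySem.Set.update_nil_left]
    simp
  have hnodup : R.keys.Nodup := by
    rw [hR]
    exact PySem.Dict.nodup_keys_foldl_modify_key versions pvMajor [] (fun _ v => (fun l => l ++ [v]))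
      _ (by simp [PySem.Dict.keys_empty])
  have hgetD : ∀ m, R.getD m [] = versions.filter (fun v => pvMajor v == m) := by
    intro m
    have hmap : R = (versions.map (fun v => (pvMajor v, v))).foldl
        (fun d p => d.modify p.1 [] (fun l => l ++ [p.2])) PySem.Dict.empty := by
      rw [hR, List.foldl_map]
    rw [hmap, PySem.Dict.getD_foldl_modify_append, PySem.Dict.getD_empty]
    simp [List.filter_map, Function.comp_def]
  rw [PySem.Dict.items_eq_map_keys R hnodup [], hkeys]
  exact List.map_congr_left (fun m _ => by rw [hgetD m])

-- B's first stage is exactly the ordered dedup of the majors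
theorem pv_majors_eq (versions : List String) :
    versions.foldl (fun acc v => PySem.Set.add acc (pvMajor v)) []
    = PySem.List.dedup (versions.map pvMajor) := by
  rw [PySem.List.dedup_eq_ofList, PySem.Set.ofList_eq_foldl, List.foldl_map]

-- ===== VERDICT (by name: the statement is the Claim_ definition above) =====
theorem extract_versions_by_major_spec : Claim_equal_extract_versions_by_major := by
  intro versions _
  unfold Spec_extract_versions_by_major extract_versions_by_major extract_versions_by_major_alt
  rw [pv_foldl_eq, pv_dict_canonical, pv_majors_eq]
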